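-- pv_equiv track=rewrite | github.com/Kurorororo/didp-models | m-pdtsp/mpdtsp_to_didp.py | compute_min_distance_from
-- ===== SOURCE A (Python) =====
-- def compute_min_distance_from(nodes, edges):
--     max_distance = max(edges.values())
--     result = {
--         i: min([max_distance] + [edges[i, j] for j in nodes if (i, j) in edges])
--         for i in nodes[:-1]
--     }
--     result[nodes[-1]] = 0
--
--     return result
-- ===== SOURCE B (Python) =====
-- def compute_min_distance_from(nodes, edges):
--     max_distance = max(edges.values())
--     node_set = set(nodes)
--     best = {}
--     for (i, j), w in edges.items():
--         if j in node_set and (i not in best or w < best[i]):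
--             best[i] = w
--     result = {i: best.get(i, max_distance) for i in nodes[:-1]}
--     result[nodes[-1]] = 0
--     return result
-- ===== Notes on version B (the rewrite author's own statement) =====
-- stated objective: faster
-- what changed: Replaces A's per-node scan over all nodes (a dict comprehension with an inner list over nodes for every node) by a single pass over the edge dict that tracks the minimum outgoing weight per source node, then a lookup per node.
import Mathlib
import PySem

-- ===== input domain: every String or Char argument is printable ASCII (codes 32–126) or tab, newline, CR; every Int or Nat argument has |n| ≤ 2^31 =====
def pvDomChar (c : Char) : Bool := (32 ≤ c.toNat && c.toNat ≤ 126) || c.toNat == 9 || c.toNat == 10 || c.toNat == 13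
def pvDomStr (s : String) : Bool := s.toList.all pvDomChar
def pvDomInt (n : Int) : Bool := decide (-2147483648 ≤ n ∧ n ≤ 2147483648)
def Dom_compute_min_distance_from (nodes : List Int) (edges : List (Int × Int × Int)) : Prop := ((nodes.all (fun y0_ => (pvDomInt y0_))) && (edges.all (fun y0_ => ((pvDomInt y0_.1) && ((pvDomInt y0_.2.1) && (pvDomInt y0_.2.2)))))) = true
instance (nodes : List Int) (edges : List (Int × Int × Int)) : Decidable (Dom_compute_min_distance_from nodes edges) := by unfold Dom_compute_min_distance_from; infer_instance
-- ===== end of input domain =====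

-- B replaces A's per-node scan over all nodes by one pass over the edge dict tracking the
-- minimum outgoing weight per source node (O(V+E) instead of O(V^2) lookups); same return value.

-- The Python 'edges' parameter is a dict keyed by (i, j); both ports receive it as the list of
-- its (i, j, w) triples and rebuild the dict (insertion order, last write wins) before running.
def pvEdgeDict (edges : List (Int × Int × Int)) : PySem.Dict (Int × Int) Int :=
  edges.foldl (fun d t => d.insert (t.1, t.2.1) t.2.2) PySem.Dict.empty

-- ===== PORT A =====
def compute_min_distance_from (nodes : List Int) (edges : List (Int × Int × Int)) : List (Int × Int) :=
  let d := pvEdgeDict edges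
  let max_distance := (PySem.List.max? d.values (fun v => v)).getD 0
  let result : PySem.Dict Int Int :=
    (PySem.List.slice nodes none (some (-1))).foldl
      (fun r i =>
        r.insert i ((PySem.List.min?
          (max_distance :: (nodes.filter (fun j => d.contains (i, j))).map (fun j => d.getD (i, j) 0))
          (fun v => v)).getD 0))
      PySem.Dict.empty
  (result.insert (PySem.List.pyGetD nodes (-1) 0) 0).items

-- ===== PORT B =====
def compute_min_distance_from_alt (nodes : List Int) (edges : List (Int × Int × Int)) : List (Int × Int) :=
  let d := pvEdgeDict edges
  let max_distance := (PySem.List.max? d.values (fun v => v)).getD 0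
  let node_set := PySem.Set.ofList nodes
  let best : PySem.Dict Int Int :=
    d.items.foldl
      (fun b p =>
        if PySem.Set.contains node_set p.1.2 && (!(b.contains p.1.1) || decide (p.2 < b.getD p.1.1 0))
        then b.insert p.1.1 p.2 else b)
      PySem.Dict.empty
  let result : PySem.Dict Int Int :=
    (PySem.List.slice nodes none (some (-1))).foldl
      (fun r i => r.insert i (best.getD i max_distance)) PySem.Dict.empty
  (result.insert (PySem.List.pyGetD nodes (-1) 0) 0).items

-- ===== PRECONDITION & SPEC =====
-- Python A raises on empty inputs: max(()) is a ValueError when edges is empty, and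
-- nodes[-1] is an IndexError when nodes is empty; exactly those inputs are excluded.
def Pre_compute_min_distance_from (nodes : List Int) (edges : List (Int × Int × Int)) : Prop :=
  nodes ≠ [] ∧ edges ≠ []
instance (nodes : List Int) (edges : List (Int × Int × Int)) : Decidable (Pre_compute_min_distance_from nodes edges) := by unfold Pre_compute_min_distance_from; infer_instance

def pvWitness_compute_min_distance_from : List Int × (List (Int × Int × Int)) := ([1, 2], [(1, 2, 5)])

def Spec_compute_min_distance_from (nodes : List Int) (edges : List (Int × Int × Int)) (out : List (Int × Int)) : Prop := out = compute_min_distance_from_alt nodes edges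
instance (nodes : List Int) (edges : List (Int × Int × Int)) (out : List (Int × Int)) : Decidable (Spec_compute_min_distance_from nodes edges out) := by unfold Spec_compute_min_distance_from; infer_instance

-- ===== CLAIM (what is proved, stated in full; the proofs are below) =====
def Claim_equal_compute_min_distance_from : Prop := ∀ (nodes : List Int) (edges : List (Int × Int × Int)), Dom_compute_min_distance_from nodes edges → Pre_compute_min_distance_from nodes edges → Spec_compute_min_distance_from nodes edges (compute_min_distance_from nodes edges)

-- ===== LEMMAS AND PROOFS =====

-- running minimum as an Option (what B's per-key entry evolves as)
def pvStep2 (o : Option Int) (w : Int) : Option Int :=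
  some (match o with | none => w | some m => min m w)

theorem pvFoldl_step2_some (l : List Int) (m : Int) :
    l.foldl pvStep2 (some m) = some (l.foldl min m) := by
  induction l generalizing m with
  | nil => rfl
  | cons w t ih => simpa [pvStep2] using ih (min m w)

theorem pvFoldl_min_spec (l : List Int) (a : Int) :
    l.foldl min a ≤ a ∧ (∀ x ∈ l, l.foldl min a ≤ x) ∧ (l.foldl min a = a ∨ l.foldl min a ∈ l) := by
  induction l generalizing a with
  | nil => simp
  | cons w t ih =>
    obtain ⟨h1, h2, h3⟩ := ih (min a w)
    refine ⟨le_trans h1 (min_le_left a w), ?_, ?_⟩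
    · intro x hx
      rcases List.mem_cons.mp hx with rfl | hx
      · exact le_trans h1 (min_le_right a x)
      · exact h2 x hx
    · rcases h3 with h | h
      · rcases le_total a w with hw | hw
        · exact Or.inl (by rw [List.foldl_cons, h, min_eq_left hw])
        · exact Or.inr (by rw [List.foldl_cons, h, min_eq_right hw]; exact List.mem_cons_self)
      · exact Or.inr (List.mem_cons_of_mem w h)

theorem pvFoldl_min_mem_eq (l1 l2 : List Int) (a : Int) (h : ∀ x, x ∈ l1 ↔ x ∈ l2) :
    l1.foldl min a = l2.foldl min a := by
  obtain ⟨h1a, h1m, h1e⟩ := pvFoldl_min_spec l1 a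
  obtain ⟨h2a, h2m, h2e⟩ := pvFoldl_min_spec l2 a
  apply le_antisymm
  · rcases h2e with he | he
    · rw [he]; exact h1a
    · exact h1m _ ((h _).mpr he)
  · rcases h1e with he | he
    · rw [he]; exact h2a
    · exact h2m _ ((h _).mp he)

theorem pvOMin_getD (l : List Int) (a : Int) (h : ∀ x ∈ l, x ≤ a) :
    (l.foldl pvStep2 none).getD a = l.foldl min a := by
  cases l with
  | nil => rfl
  | cons w t =>
    have hw : min a w = w := min_eq_right (h w List.mem_cons_self)
    calc ((w :: t).foldl pvStep2 none).getD a
        = (t.foldl pvStep2 (some w)).getD a := by rfl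
      _ = t.foldl min w := by rw [pvFoldl_step2_some]; rfl
      _ = (w :: t).foldl min a := by rw [List.foldl_cons, hw]

-- B's grouping loop, characterised per key
theorem pvBest_get (S : PySem.Set Int) (its : List ((Int × Int) × Int))
    (b : PySem.Dict Int Int) (i : Int) :
    (its.foldl
      (fun b p =>
        if PySem.Set.contains S p.1.2 && (!(b.contains p.1.1) || decide (p.2 < b.getD p.1.1 0))
        then b.insert p.1.1 p.2 else b) b).get? i
    = ((its.filter (fun p => p.1.1 == i && PySem.Set.contains S p.1.2)).map (·.2)).foldl
        pvStep2 (b.get? i) := by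
  induction its generalizing b with
  | nil => rfl
  | cons p t ih =>
    rw [List.foldl_cons, List.filter_cons]
    by_cases hi : p.1.1 = i
    · by_cases hj : PySem.Set.contains S p.1.2 = true
      · cases hb : b.get? i with
        | none =>
          have hc : b.contains p.1.1 = false := by
            rw [PySem.Dict.contains_eq_isSome_get?, hi, hb]; rfl
          rw [if_pos (by rw [hj, hc]; simp), if_pos (by rw [hi, hj]; simp), List.map_cons,
            List.foldl_cons, ih, hi, PySem.Dict.get?_insert_self]
          rfl
        | some m =>
          have hgd : b.getD p.1.1 0 = m := by
            rw [hi]; exact PySem.Dict.getD_of_get?_eq_some b 0 hb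
          have hc : b.contains p.1.1 = true := by
            rw [PySem.Dict.contains_eq_isSome_get?, hi, hb]; rfl
          by_cases hlt : p.2 < m
          · rw [if_pos (by rw [hj, hc, hgd]; simp [hlt]), if_pos (by rw [hi, hj]; simp),
              List.map_cons, List.foldl_cons, ih, hi, PySem.Dict.get?_insert_self]
            have hmin : min m p.2 = p.2 := min_eq_right (le_of_lt hlt)
            simp [pvStep2, hmin]
          · rw [if_neg (by rw [hj, hc, hgd]; simp [hlt]), if_pos (by rw [hi, hj]; simp),
              List.map_cons, List.foldl_cons, ih, hb]
            have hmin : min m p.2 = m := min_eq_left (le_of_not_gt hlt)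
            simp [pvStep2, hmin]
      · have hj' : S.contains p.1.2 = false := by simpa using hj
        rw [if_neg (by rw [hj']; simp), if_neg (by rw [hj']; simp), ih]
    · by_cases hcond : (PySem.Set.contains S p.1.2 && (!(b.contains p.1.1) || decide (p.2 < b.getD p.1.1 0))) = true
      · rw [if_pos hcond, if_neg (by simp [hi]), ih, PySem.Dict.get?_insert_of_ne _ _ (fun h => hi h.symm)]
      · rw [if_neg hcond, if_neg (by simp [hi]), ih]

theorem pvEdgeDict_nodup (edges : List (Int × Int × Int)) : (pvEdgeDict edges).keys.Nodup := by
  unfold pvEdgeDict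
  exact PySem.Dict.nodup_keys_foldl_insert_key edges (fun t => (t.1, t.2.1)) (fun d t => t.2.2)
    PySem.Dict.empty (by simp [PySem.Dict.keys_empty])

-- the two candidate lists (A's scan over nodes, B's scan over edge items) carry the same values
theorem pvCand_mem (nodes : List Int) (d : PySem.Dict (Int × Int) Int) (hnd : d.keys.Nodup)
    (i x : Int) :
    x ∈ (nodes.filter (fun j => d.contains (i, j))).map (fun j => d.getD (i, j) 0) ↔
    x ∈ (d.items.filter (fun p => p.1.1 == i && PySem.Set.contains (PySem.Set.ofList nodes) p.1.2)).map (·.2) := by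
  constructor
  · intro hx
    obtain ⟨j, hj, rfl⟩ := List.mem_map.mp hx
    obtain ⟨hjn, hcon⟩ := List.mem_filter.mp hj
    have hsome : (d.get? (i, j)).isSome := by
      rw [← PySem.Dict.contains_eq_isSome_get?]; exact hcon
    obtain ⟨w, hw⟩ := Option.isSome_iff_exists.mp hsome
    have hgd : d.getD (i, j) 0 = w := PySem.Dict.getD_of_get?_eq_some d 0 hw
    refine List.mem_map.mpr ⟨((i, j), w), List.mem_filter.mpr ⟨?_, ?_⟩, by simp [hgd]⟩
    · exact PySem.Dict.mem_items_of_get?_eq_some d hw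
    · simp only [beq_self_eq_true, Bool.true_and]
      have : j ∈ PySem.Set.ofList nodes := (PySem.Set.mem_ofList nodes j).mpr hjn
      simpa [pysem] using this
  · intro hx
    obtain ⟨p, hp, rfl⟩ := List.mem_map.mp hx
    obtain ⟨hpi, hcnd⟩ := List.mem_filter.mp hp
    have hkey : p.1.1 = i ∧ PySem.Set.contains (PySem.Set.ofList nodes) p.1.2 = true := by
      simpa using hcnd
    have hget : d.get? p.1 = some p.2 := PySem.Dict.get?_of_mem_items d hpi hnd
    have hjn : p.1.2 ∈ nodes := by
      have := hkey.2
      rw [show PySem.Set.contains (PySem.Set.ofList nodes) p.1.2 = decide (p.1.2 ∈ nodes) from by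
        simp [pysem]] at this
      exact of_decide_eq_true this
    refine List.mem_map.mpr ⟨p.1.2, List.mem_filter.mpr ⟨hjn, ?_⟩, ?_⟩
    · rw [PySem.Dict.contains_eq_isSome_get?,
        show ((i, p.1.2) : Int × Int) = p.1 from by rw [← hkey.1], hget]; rfl
    · rw [show ((i, p.1.2) : Int × Int) = p.1 from by rw [← hkey.1]]
      exact PySem.Dict.getD_of_get?_eq_some d 0 hget

-- every candidate weight is a dict value, hence ≤ max(edges.values())
theorem pvCand_le_max (d : PySem.Dict (Int × Int) Int) (i x : Int) (S : PySem.Set Int)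
    (hx : x ∈ (d.items.filter (fun p => p.1.1 == i && PySem.Set.contains S p.1.2)).map (·.2)) :
    x ≤ (PySem.List.max? d.values (fun v => v)).getD 0 := by
  obtain ⟨p, hp, rfl⟩ := List.mem_map.mp hx
  have hv : p.2 ∈ d.values := by
    have : p ∈ d.items := (List.mem_filter.mp hp).1
    exact List.mem_map.mpr ⟨p, this, rfl⟩
  cases hm : PySem.List.max? d.values (fun v => v) with
  | none =>
    have hnil : d.values = [] := (PySem.List.max?_eq_none_iff d.values (fun v => v)).mp hm
    rw [hnil] at hv
    cases hv
  | some m =>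
    simpa using PySem.List.max?_isMax hm p.2 hv

-- the per-node value computed by A equals B's lookup
theorem pvValue_eq (nodes : List Int) (d : PySem.Dict (Int × Int) Int) (hnd : d.keys.Nodup)
    (i : Int) :
    (PySem.List.min?
      ((PySem.List.max? d.values (fun v => v)).getD 0 ::
        (nodes.filter (fun j => d.contains (i, j))).map (fun j => d.getD (i, j) 0))
      (fun v => v)).getD 0
    = (d.items.foldl
        (fun b p =>
          if PySem.Set.contains (PySem.Set.ofList nodes) p.1.2 &&
              (!(b.contains p.1.1) || decide (p.2 < b.getD p.1.1 0))
          then b.insert p.1.1 p.2 else b) PySem.Dict.empty).getD i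
        ((PySem.List.max? d.values (fun v => v)).getD 0) := by
  set maxd := (PySem.List.max? d.values (fun v => v)).getD 0 with hmaxd
  set candA := (nodes.filter (fun j => d.contains (i, j))).map (fun j => d.getD (i, j) 0)
  set candB := (d.items.filter
    (fun p => p.1.1 == i && PySem.Set.contains (PySem.Set.ofList nodes) p.1.2)).map (·.2)
    with hcandB
  have hmemeq : ∀ x, x ∈ candA ↔ x ∈ candB := pvCand_mem nodes d hnd i
  have hle : ∀ x ∈ candB, x ≤ maxd := fun x hx => pvCand_le_max d i x _ (hcandB ▸ hx)
  rw [PySem.Dict.getD_eq_get?_getD, pvBest_get, PySem.Dict.get?_empty]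
  rw [PySem.List.min?_id_cons, Option.getD_some, ← hcandB, pvOMin_getD candB maxd hle]
  exact pvFoldl_min_mem_eq candA candB maxd hmemeq

-- ===== VERDICT (by name: the statement is the Claim_ definition above) =====
theorem compute_min_distance_from_spec : Claim_equal_compute_min_distance_from := by
  intro nodes edges _ _
  have hnd := pvEdgeDict_nodup edges
  unfold Spec_compute_min_distance_from
  simp only [compute_min_distance_from, compute_min_distance_from_alt,
    pvValue_eq nodes (pvEdgeDict edges) hnd]
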